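-- pv_equiv track=rewrite | github.com/mamroax/Python_lab | lab_1/versions_1-15.py | version_10
-- ===== SOURCE A (Python) =====
-- def version_10(list1: list[int]) -> int:
--     """Написать функцию, которая принимает целочисленный
--     список, состоящий из n элементов, и возвращает сумму элементов списка.
--      Однако стоит исключить из подсчета число 13 и
--     числа, которые следуют после него. Например, для входящего
--     списка {1,2,3,13,4} сумма будет равна 6."""
--     summ = 0
--     for i in range(len(list1)):
--         if list1[i] == 13:
--             return summ
--         else:
--             summ += list1[i]
--     return summ
-- ===== SOURCE B (Python) =====
-- def version_10(list1: list[int]) -> int: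
--     if 13 in list1:
--         return sum(list1[:list1.index(13)])
--     return sum(list1)
-- ===== Notes on version B (the rewrite author's own statement) =====
-- stated objective: idiomatic
-- what changed: Replaced the single interleaved check-and-accumulate loop by a two-phase find-then-sum: locate the first 13 with index(), then sum the prefix slice (or the whole list if no 13).
import Mathlib
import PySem

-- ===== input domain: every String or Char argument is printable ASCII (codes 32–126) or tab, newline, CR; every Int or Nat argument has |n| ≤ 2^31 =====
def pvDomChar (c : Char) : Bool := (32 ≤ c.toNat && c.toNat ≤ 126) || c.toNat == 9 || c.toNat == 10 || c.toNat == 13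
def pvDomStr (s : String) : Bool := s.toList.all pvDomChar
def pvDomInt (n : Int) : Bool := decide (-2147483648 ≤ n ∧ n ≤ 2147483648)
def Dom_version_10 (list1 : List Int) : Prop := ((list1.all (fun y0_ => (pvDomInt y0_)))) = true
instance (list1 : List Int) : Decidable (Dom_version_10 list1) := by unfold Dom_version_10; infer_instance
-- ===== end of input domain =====

-- B restructures A's single accumulate-with-early-return loop into a two-phase
-- find-then-sum: locate the first 13, then sum the prefix slice (objective: idiomatic).

-- ===== PORT A =====
-- the for-loop with running total and early return on 13
def version_10_loop : List Int → Int → Int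
  | [], summ => summ
  | x :: xs, summ => if x == 13 then summ else version_10_loop xs (summ + x)

def version_10 (list1 : List Int) : Int := version_10_loop list1 0

-- ===== PORT B =====
def version_10_alt (list1 : List Int) : Int :=
  if (13 : Int) ∈ list1 then
    match PySem.List.index? list1 (13 : Int) with
    | some i => (PySem.List.slice list1 none (some (i : Int))).sum
    | none => list1.sum   -- unreachable (13 ∈ list1)
  else list1.sum

-- ===== PRECONDITION & SPEC =====
def Spec_version_10 (list1 : List Int) (out : Int) : Prop := out = version_10_alt list1
instance (list1 : List Int) (out : Int) : Decidable (Spec_version_10 list1 out) := by unfold Spec_version_10; infer_instance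

-- ===== CLAIM (what is proved, stated in full; the proofs are below) =====
def Claim_equal_version_10 : Prop := ∀ (list1 : List Int), Dom_version_10 list1 → Spec_version_10 list1 (version_10 list1)

-- ===== LEMMAS AND PROOFS =====

lemma version_10_alt_nil : version_10_alt [] = 0 := by decide

lemma version_10_alt_cons (x : Int) (xs : List Int) :
    version_10_alt (x :: xs) = if x = 13 then 0 else x + version_10_alt xs := by
  by_cases hx : x = 13
  · subst hx
    rw [version_10_alt, if_pos (List.mem_cons_self), PySem.List.index?_cons_self]
    have h0 : PySem.List.slice ((13:Int) :: xs) none (some ((0 : Nat) : Int)) = ((13:Int)::xs).take 0 :=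
      PySem.List.slice_to_natCast _ _
    simp at h0
    simp [h0]
  · have hcons := PySem.List.index?_cons_of_ne (x := x) (v := (13 : Int)) xs hx
    by_cases hm : (13 : Int) ∈ xs
    · obtain ⟨i, hi⟩ := Option.isSome_iff_exists.1
        ((PySem.List.index?_isSome_iff (xs := xs) (v := (13 : Int))).2 hm)
      rw [hi] at hcons
      simp only [version_10_alt, List.mem_cons, hx, hm, or_true, if_pos, hcons,
        Option.map_some, hi]
      have h1 : PySem.List.slice (x :: xs) none (some ((i + 1 : Nat) : Int)) = (x :: xs).take (i + 1) :=
        PySem.List.slice_to_natCast _ _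
      have h2 : PySem.List.slice xs none (some ((i : Nat) : Int)) = xs.take i :=
        PySem.List.slice_to_natCast _ _
      rw [h1, h2]
      simp [List.take_succ_cons]
    · rw [(PySem.List.index?_eq_none_iff xs (13:Int)).2 hm] at hcons
      simp [version_10_alt, hx, hm, Ne.symm hx]

lemma version_10_loop_eq (xs : List Int) : ∀ s : Int, version_10_loop xs s = s + version_10_alt xs := by
  induction xs with
  | nil => intro s; simp [version_10_loop, version_10_alt_nil]
  | cons x xs ih =>
    intro s
    rw [version_10_alt_cons]
    by_cases hx : x = 13
    · simp [version_10_loop, hx]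
    · have hne : (x == (13 : Int)) = false := by simp [hx]
      simp only [version_10_loop, hne, Bool.false_eq_true, if_false, ih, hx, if_false]
      ring

-- ===== VERDICT (by name: the statement is the Claim_ definition above) =====
theorem version_10_spec : Claim_equal_version_10 := by
  intro list1 _
  unfold Spec_version_10 version_10
  rw [version_10_loop_eq]
  ring
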